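-- pv_equiv track=rewrite | github.com/wpt888/edit-factory | app/services/srt_validator.py | normalize_srt_newlines
-- ===== SOURCE A (Python) =====
-- def normalize_srt_newlines(srt_content: str) -> str:
--     """Join multiline subtitle text within each SRT entry into single lines.
--
--     HTML previews collapse newlines to spaces, but FFmpeg/libass renders them
--     as literal line breaks. This normalizer ensures render matches preview by
--     joining text lines within each entry with a space.
--
--     SRT structure (sequence numbers, timestamps, blank separators) is preserved.
--
--     Args:
--         srt_content: SRT file content (may have multiline text entries)
--
--     Returns:
--         SRT content with each entry's text on a single line
--     """
--     if not srt_content: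
--         return srt_content
--
--     lines = srt_content.split('\n')
--     result = []
--     i = 0
--     while i < len(lines):
--         line = lines[i]
--         stripped = line.strip()
--
--         # Empty line (SRT entry separator) — preserve
--         if not stripped:
--             result.append(line)
--             i += 1
--             continue
--
--         # Sequence number (digit-only line) — preserve
--         if stripped.isdigit():
--             result.append(line)
--             i += 1
--             continue
--
--         # Timestamp line (contains " --> ") — preserve
--         if ' --> ' in stripped:
--             result.append(line)
--             i += 1
--             # Collect all text lines until next blank or end
--             text_parts = []
--             while i < len(lines) and lines[i].strip():
--                 text_parts.append(lines[i].strip())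
--                 i += 1
--             # Join multiline text into single line
--             if text_parts:
--                 result.append(' '.join(text_parts))
--             continue
--
--         # Fallback: preserve line as-is
--         result.append(line)
--         i += 1
--
--     return '\n'.join(result)
-- ===== SOURCE B (Python) =====
-- def normalize_srt_newlines(srt_content: str) -> str:
--     """Single flat pass with an in_text flag and a text buffer (no nested loop)."""
--     result = []
--     buf = []
--     in_text = False
--     for line in srt_content.split('\n'):
--         if in_text:
--             stripped = line.strip()
--             if stripped:
--                 buf.append(stripped)
--                 continue
--             if buf:
--                 result.append(' '.join(buf))
--             buf = []
--             in_text = False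
--             result.append(line)
--             continue
--         stripped = line.strip()
--         if not stripped or stripped.isdigit():
--             result.append(line)
--         elif ' --> ' in stripped:
--             result.append(line)
--             in_text = True
--         else:
--             result.append(line)
--     if buf:
--         result.append(' '.join(buf))
--     return '\n'.join(result)
-- ===== Notes on version B (the rewrite author's own statement) =====
-- stated objective: simpler
-- what changed: Replaced A's nested while-loop (manual index with an inner scan that consumes text lines after a timestamp) by a single flat pass over the lines maintaining an in_text flag and a text buffer that is flushed on blank lines and at the end.
import Mathlib
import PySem

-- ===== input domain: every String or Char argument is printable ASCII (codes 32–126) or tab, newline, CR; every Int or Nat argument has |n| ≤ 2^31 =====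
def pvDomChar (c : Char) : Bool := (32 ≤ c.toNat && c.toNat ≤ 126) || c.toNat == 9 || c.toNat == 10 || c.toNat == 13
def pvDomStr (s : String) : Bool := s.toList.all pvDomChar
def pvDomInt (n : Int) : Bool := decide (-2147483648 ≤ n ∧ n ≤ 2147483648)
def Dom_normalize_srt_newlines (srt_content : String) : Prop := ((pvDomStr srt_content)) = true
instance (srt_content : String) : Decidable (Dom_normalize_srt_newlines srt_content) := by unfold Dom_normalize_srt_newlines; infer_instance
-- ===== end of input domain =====

-- B replaces A's nested while-loop (inner text-collecting scan with manual index) by a single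
-- flat pass keeping an `in_text` flag and a text buffer; same return value, objective: simpler.

-- ===== PORT A =====
-- lines split on '\n' (separator is the nonempty literal "\n", so split? is always `some`)
def pvSplitNL (s : String) : List String := (PySem.Str.split? s "\n").getD []

-- inner while-loop of A: collect stripped text lines until a blank line or the end;
-- returns (text_parts, remaining lines)
def pvACollect : List String → List String × List String
  | [] => ([], [])
  | l :: rest =>
    if PySem.Str.strip l ≠ "" then
      let p := pvACollect rest
      (PySem.Str.strip l :: p.1, p.2)
    else ([], l :: rest)

theorem pvACollect_len : ∀ ls : List String, (pvACollect ls).2.length ≤ ls.length := by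
  intro ls
  induction ls with
  | nil => simp [pvACollect]
  | cons l rest ih =>
    simp only [pvACollect]
    split
    · exact Nat.le_succ_of_le ih
    · simp

-- outer while-loop of A
def pvALoop : List String → List String
  | [] => []
  | l :: rest =>
    let stripped := PySem.Str.strip l
    if stripped = "" then l :: pvALoop rest
    else if PySem.Str.strIsdigit stripped then l :: pvALoop rest
    else if PySem.Str.isIn " --> " stripped then
      let p := pvACollect rest
      l :: ((if p.1 ≠ [] then [PySem.Str.join " " p.1] else []) ++ pvALoop p.2)
    else l :: pvALoop rest
termination_by ls => ls.length
decreasing_by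
  all_goals first
    | exact Nat.lt_succ_of_le (pvACollect_len rest)
    | simp

def normalize_srt_newlines (srt_content : String) : String :=
  if srt_content = "" then srt_content
  else PySem.Str.join "\n" (pvALoop (pvSplitNL srt_content))

-- ===== PORT B =====
-- B's single flat loop: state = (text buffer, in_text flag); returns the tail of `result`
def pvBLoop : List String → List String → Bool → List String
  | [], buf, _ => if buf ≠ [] then [PySem.Str.join " " buf] else []
  | l :: rest, buf, inText =>
    if inText then
      let stripped := PySem.Str.strip l
      if stripped ≠ "" then pvBLoop rest (buf ++ [stripped]) true
      else
        (if buf ≠ [] then [PySem.Str.join " " buf] else []) ++ l :: pvBLoop rest [] false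
    else
      let stripped := PySem.Str.strip l
      if stripped = "" ∨ PySem.Str.strIsdigit stripped then l :: pvBLoop rest [] false
      else if PySem.Str.isIn " --> " stripped then l :: pvBLoop rest [] true
      else l :: pvBLoop rest [] false

def normalize_srt_newlines_alt (srt_content : String) : String :=
  PySem.Str.join "\n" (pvBLoop (pvSplitNL srt_content) [] false)

-- ===== PRECONDITION & SPEC =====
def Spec_normalize_srt_newlines (srt_content : String) (out : String) : Prop := out = normalize_srt_newlines_alt srt_content
instance (srt_content : String) (out : String) : Decidable (Spec_normalize_srt_newlines srt_content out) := by unfold Spec_normalize_srt_newlines; infer_instance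

-- ===== CLAIM (what is proved, stated in full; the proofs are below) =====
def Claim_equal_normalize_srt_newlines : Prop := ∀ (srt_content : String), Dom_normalize_srt_newlines srt_content → Spec_normalize_srt_newlines srt_content (normalize_srt_newlines srt_content)

-- ===== LEMMAS AND PROOFS =====

-- Combined invariant, strong induction on the number of remaining lines:
-- outside text mode B's loop agrees with A's outer loop; in text mode B's buffer run
-- is exactly A's inner collect followed by A's outer loop on the remainder.
theorem pv_main : ∀ n, ∀ ls : List String, ls.length ≤ n →
    (pvALoop ls = pvBLoop ls [] false) ∧
    (∀ buf, pvBLoop ls buf true =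
      (if buf ++ (pvACollect ls).1 ≠ [] then [PySem.Str.join " " (buf ++ (pvACollect ls).1)] else [])
        ++ pvALoop (pvACollect ls).2) := by
  intro n
  induction n with
  | zero =>
    intro ls hls
    have hnil : ls = [] := List.length_eq_zero_iff.mp (Nat.le_zero.mp hls)
    subst hnil
    exact ⟨by rw [pvALoop, pvBLoop]; simp, by intro buf; rw [pvBLoop]; simp [pvACollect, pvALoop]⟩
  | succ n ih =>
    intro ls hls
    match ls with
    | [] =>
      exact ⟨by rw [pvALoop, pvBLoop]; simp, by intro buf; rw [pvBLoop]; simp [pvACollect, pvALoop]⟩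
    | l :: rest =>
      have hrest : rest.length ≤ n := by simpa using Nat.succ_le_succ_iff.mp hls
      constructor
      · -- outside text mode
        by_cases h0 : PySem.Str.strip l = ""
        · rw [pvALoop, pvBLoop]
          simp [h0, (ih rest hrest).1]
        · by_cases hd : PySem.Str.strIsdigit (PySem.Str.strip l) = true
          · rw [pvALoop, pvBLoop]
            simp only [pysem] at hd
            simp [h0, hd, (ih rest hrest).1]
          · by_cases ht : PySem.Str.isIn " --> " (PySem.Str.strip l) = true
            · have hB := (ih rest hrest).2 []
              rw [pvALoop, pvBLoop]
              simp only [pysem] at hd ht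
              rw [Bool.not_eq_true] at hd
              have hIn : PySem.Chars.isIn [' ','-','-','>',' '] (PySem.Chars.strip l.toList) = true :=
                (PySem.Chars.isIn_iff_infix _ _).mpr (by simpa using ht)
              simp [h0, hd, hIn, hB]
            · rw [pvALoop, pvBLoop]
              simp only [pysem] at hd ht
              rw [Bool.not_eq_true] at hd
              have hIn : PySem.Chars.isIn [' ','-','-','>',' '] (PySem.Chars.strip l.toList) = false :=
                (PySem.Chars.isIn_eq_false_iff _ _).mpr (by simpa using ht)
              simp [h0, hd, hIn, (ih rest hrest).1]
      · -- inside text mode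
        intro buf
        by_cases h0 : PySem.Str.strip l = ""
        · have hA : pvALoop (l :: rest) = l :: pvALoop rest := by
            rw [pvALoop]; simp [h0]
          rw [pvBLoop]
          simp [pvACollect, h0, hA, (ih rest hrest).1]
        · have hB := (ih rest hrest).2 (buf ++ [PySem.Str.strip l])
          rw [pvBLoop]
          simp [pvACollect, h0, hB, List.append_assoc]

-- ===== VERDICT (by name: the statement is the Claim_ definition above) =====
theorem normalize_srt_newlines_spec : Claim_equal_normalize_srt_newlines := by
  intro s _
  unfold Spec_normalize_srt_newlines normalize_srt_newlines normalize_srt_newlines_alt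
  by_cases hs : s = ""
  · subst hs
    decide
  · rw [if_neg hs, (pv_main (pvSplitNL s).length (pvSplitNL s) le_rfl).1]
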